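-- pv_equiv track=rewrite | github.com/gorzalczany/advent-of-code | 2023/11/solve.py | getEmpties
-- ===== SOURCE A (Python) =====
-- def get_column(matrix, i):
--     return [row[i] for row in matrix]
--
-- def getEmpties(image):
--   empty_columns_x = []
--   empty_rows_y = []
--   for iy, row in enumerate(image):
--     if all(e == "." for e in row):
--         empty_rows_y.append(iy)
--
--   for ix in range(0, len(image[0]),1 ):
--     column = get_column(image, ix)
--     if all(e == "." for e in column):
--       empty_columns_x.append(ix)
--
--   return(empty_columns_x, empty_rows_y)
-- ===== SOURCE B (Python) =====
-- def getEmpties(image):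
--     # Candidate elimination: keep the list of still-possibly-empty columns and
--     # shrink it row by row; an all-dot row eliminates nothing and is skipped.
--     m = len(image[0])
--     cand = list(range(m))
--     empty_rows_y = []
--     for iy, row in enumerate(image):
--         if all(e == "." for e in row):
--             empty_rows_y.append(iy)
--         elif cand:
--             cand = [ix for ix in cand if row[ix] == "."]
--     return (cand, empty_rows_y)
-- ===== Notes on version B (the rewrite author's own statement) =====
-- stated objective: faster
-- what changed: Replaces A's per-column re-scan of the whole grid (get_column built for every column index) with candidate elimination: one pass over the rows shrinking the list of still-possibly-empty columns, skipping all-dot rows; intended as faster (a timing run measured ~1.7x median at the largest size, varying with grid shape).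
import Mathlib
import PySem

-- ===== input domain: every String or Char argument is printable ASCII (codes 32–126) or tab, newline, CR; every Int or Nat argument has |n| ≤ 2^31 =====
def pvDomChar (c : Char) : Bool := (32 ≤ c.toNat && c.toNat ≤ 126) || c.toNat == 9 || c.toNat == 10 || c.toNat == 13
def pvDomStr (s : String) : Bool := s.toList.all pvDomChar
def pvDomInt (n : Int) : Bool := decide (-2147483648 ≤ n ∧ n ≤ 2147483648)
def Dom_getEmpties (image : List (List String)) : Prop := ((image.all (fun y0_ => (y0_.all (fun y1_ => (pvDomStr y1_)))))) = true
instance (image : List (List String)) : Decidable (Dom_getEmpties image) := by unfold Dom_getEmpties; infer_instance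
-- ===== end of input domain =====

-- B replaces A's per-column re-scan of the grid by candidate elimination in one pass over
-- the rows (intended as faster; a timing run measured ~1.7x median at the largest size,
-- varying with grid shape).

-- ===== PORT A =====
-- get_column(matrix, i): [row[i] for row in matrix]; row[i] may raise IndexError,
-- so cells are Option String (none = IndexError, excluded by Pre_).
def getColumn (matrix : List (List String)) (i : Int) : List (Option String) :=
  matrix.map (fun row => PySem.List.pyGet? row i)

def getEmpties (image : List (List String)) : List Int × List Int :=
  -- first loop: for iy, row in enumerate(image): if all(e == "." for e in row): append iy
  let empty_rows_y :=
    (PySem.List.enumerate image 0).foldl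
      (fun acc p => if p.2.all (fun e => e == ".") then acc ++ [p.1] else acc) []
  -- len(image[0]) raises IndexError on an empty image: excluded by Pre_
  let m : Int := ((PySem.List.pyGet? image 0).getD []).length
  -- second loop: for ix in range(0, len(image[0]), 1): append ix if the column is all dots
  let empty_columns_x :=
    (PySem.List.pyRange 0 m 1).foldl
      (fun acc ix =>
        if (getColumn image ix).all (fun e => e == some ".") then acc ++ [ix] else acc) []
  (empty_columns_x, empty_rows_y)

-- ===== PORT B =====
-- B's single loop over enumerate(image), carrying (empty_rows_y, cand);
-- row[ix] in the comprehension may raise IndexError: pyGet? (none excluded by Pre_)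
def altLoop : List (List String) → Int → List Int → List Int → List Int × List Int
  | [], _, rows, cand => (rows, cand)
  | row :: rest, iy, rows, cand =>
      if row.all (fun e => e == ".") then
        altLoop rest (iy + 1) (rows ++ [iy]) cand
      else if cand.isEmpty then
        altLoop rest (iy + 1) rows cand
      else
        altLoop rest (iy + 1) rows
          (cand.filter (fun ix => PySem.List.pyGet? row ix == some "."))

def getEmpties_alt (image : List (List String)) : List Int × List Int :=
  -- m = len(image[0]) raises IndexError on an empty image (excluded by Pre_)
  let m : Int := ((image.headD []).length : Int)
  let res := altLoop image 0 [] (PySem.List.pyRange 0 m 1)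
  (res.2, res.1)

-- ===== PRECONDITION & SPEC =====
-- Pre_ excludes exactly the inputs where A raises IndexError: the empty image
-- (image[0]) and ragged images with a row shorter than the first (row[i] in get_column).
def Pre_getEmpties (image : List (List String)) : Prop :=
  image ≠ [] ∧ ∀ row ∈ image, (image.headD []).length ≤ row.length
instance (image : List (List String)) : Decidable (Pre_getEmpties image) := by
  unfold Pre_getEmpties; infer_instance

def pvWitness_getEmpties : List (List String) := [[".", "#"], [".", "."]]

def Spec_getEmpties (image : List (List String)) (out : List Int × List Int) : Prop :=
  out = getEmpties_alt image
instance (image : List (List String)) (out : List Int × List Int) :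
    Decidable (Spec_getEmpties image out) := by unfold Spec_getEmpties; infer_instance

-- ===== CLAIM (what is proved, stated in full; the proofs are below) =====
def Claim_equal_getEmpties : Prop :=
  ∀ (image : List (List String)), Dom_getEmpties image → Pre_getEmpties image →
    Spec_getEmpties image (getEmpties image)

-- ===== LEMMAS AND PROOFS =====

-- the first component of B's fused loop is exactly A's row loop
theorem altLoop_fst (l : List (List String)) :
    ∀ (iy : Int) (rows cand : List Int),
      (altLoop l iy rows cand).1 =
        (PySem.List.enumerate l iy).foldl
          (fun acc p => if p.2.all (fun e => e == ".") then acc ++ [p.1] else acc) rows := by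
  induction l with
  | nil => intro iy rows cand; simp [altLoop, PySem.List.enumerate_nil]
  | cons row rest ih =>
      intro iy rows cand
      rw [PySem.List.enumerate_cons]
      simp only [altLoop, List.foldl_cons]
      split
      · exact ih _ _ _
      · split <;> exact ih _ _ _

-- B's candidate list at the end is the initial candidates filtered by
-- "this column is all dots", provided candidates stay inside every row
theorem altLoop_snd (l : List (List String)) :
    ∀ (iy : Int) (rows cand : List Int),
      (∀ ix ∈ cand, ∀ row ∈ l, 0 ≤ ix ∧ ix < (row.length : Int)) →
      (altLoop l iy rows cand).2 =
        cand.filter (fun ix => l.all (fun row => PySem.List.pyGet? row ix == some ".")) := by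
  induction l with
  | nil => intro iy rows cand _; simp [altLoop]
  | cons row rest ih =>
      intro iy rows cand hbound
      have hbrest : ∀ ix ∈ cand, ∀ r ∈ rest, 0 ≤ ix ∧ ix < (r.length : Int) :=
        fun ix hix r hr => hbound ix hix r (List.mem_cons_of_mem _ hr)
      simp only [altLoop]
      split
      · -- all-dot row: filtering by this row keeps every in-range candidate
        rename_i hall
        rw [ih _ _ _ hbrest]
        refine List.filter_congr ?_
        intro ix hix
        obtain ⟨h0, hlt⟩ := hbound ix hix row (List.mem_cons_self)
        have hmem : ∃ hh : ix.toNat < row.length, row[ix.toNat] = "." := by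
          refine ⟨by omega, ?_⟩
          rw [List.all_eq_true] at hall
          simpa using hall row[ix.toNat] (List.getElem_mem _)
        obtain ⟨hh, hdot⟩ := hmem
        have hget : PySem.List.pyGet? row ix = some "." := by
          rw [show ix = ((ix.toNat : Nat) : Int) from (Int.toNat_of_nonneg h0).symm,
            PySem.List.pyGet?_natCast, List.getElem?_eq_getElem hh]
          exact congrArg some hdot
        simp [List.all_cons, hget]
      · split
        · -- cand is empty: filtering the empty list is the empty list
          rename_i hemp
          rw [List.isEmpty_iff] at hemp
          subst hemp
          rw [ih _ _ _ (by simp)]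
          simp
        · rw [ih _ _ _ (fun ix hix r hr =>
            hbrest ix (List.mem_of_mem_filter hix) r hr)]
          rw [List.filter_filter]
          refine List.filter_congr ?_
          intro ix hix
          simp [List.all_cons, Bool.and_comm]

-- ===== VERDICT (by name: the statement is the Claim_ definition above) =====
theorem getEmpties_spec : Claim_equal_getEmpties := by
  intro image hdom hpre
  obtain ⟨hne, hrows⟩ := hpre
  match image with
  | [] => exact absurd rfl hne
  | r0 :: rest =>
  unfold Spec_getEmpties
  have hget0 : PySem.List.pyGet? (r0 :: rest) (0 : Int) = some r0 := by
    simp [PySem.List.pyGet?, PySem.List.pyIdx?]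
  simp only [getEmpties, getEmpties_alt, List.headD_cons, hget0, Option.getD_some,
    Prod.mk.injEq]
  simp only [List.headD_cons] at hrows
  refine ⟨?_, (altLoop_fst (r0 :: rest) 0 [] (PySem.List.pyRange 0 (r0.length : Int) 1)).symm⟩
  rw [PySem.List.foldl_append_if_eq_filter]
  rw [altLoop_snd (r0 :: rest) 0 [] (PySem.List.pyRange 0 (r0.length : Int) 1)
    (fun ix hix row hr => by
      rw [PySem.List.mem_pyRange_one] at hix
      have := hrows row hr
      constructor
      · exact hix.1
      · have : (r0.length : Int) ≤ (row.length : Int) := by exact_mod_cast hrows row hr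
        omega)]
  rw [List.nil_append]
  refine List.filter_congr ?_
  intro ix hix
  simp [getColumn, List.all_map, Function.comp_def]
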